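-- pv_equiv track=rewrite | github.com/nasirus/pbi-agent | src/pbi_agent/branding.py | _iter_logo_spans
-- ===== SOURCE A (Python) =====
-- from collections.abc import Iterator
--
-- _ACCENT_GLYPHS = frozenset({"B", "I"})
--
-- _CUTOUT_GLYPHS = frozenset({">", "_", "/"})
--
-- def _logo_span_role(char: str) -> str | None:
--     if char in _ACCENT_GLYPHS:
--         return "accent"
--     if char in _CUTOUT_GLYPHS:
--         return "cutout"
--     return None
--
-- def _iter_logo_spans(row: str) -> Iterator[tuple[str, str | None]]:
--     current_role: str | None = None
--     current_chars: list[str] = []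
--     for char in row:
--         role = _logo_span_role(char)
--         if current_chars and role != current_role:
--             yield "".join(current_chars), current_role
--             current_chars = []
--         current_chars.append(char)
--         current_role = role
--     if current_chars:
--         yield "".join(current_chars), current_role
-- ===== SOURCE B (Python) =====
-- _ACCENT_GLYPHS = frozenset({"B", "I"})
--
-- _CUTOUT_GLYPHS = frozenset({">", "_", "/"})
--
--
-- def _logo_span_role(char):
--     if char in _ACCENT_GLYPHS:
--         return "accent"
--     if char in _CUTOUT_GLYPHS:
--         return "cutout"
--     return None
--
--
-- def _iter_logo_spans(row):
--     # run scanner: two index pointers find each maximal run, then slice it out;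
--     # no character buffer, no per-char accumulator, no terminal flush.
--     i, n = 0, len(row)
--     while i < n:
--         role = _logo_span_role(row[i])
--         j = i + 1
--         while j < n and _logo_span_role(row[j]) == role:
--             j += 1
--         yield row[i:j], role
--         i = j
-- ===== Notes on version B (the rewrite author's own statement) =====
-- stated objective: alternative
-- what changed: Replaces A's per-character accumulator state machine (buffer + current_role + terminal flush) with a two-pointer run scanner: an inner scan finds the end of each maximal equal-role run and the span is sliced out of the row directly, with no buffer and no flush.
import Mathlib
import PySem

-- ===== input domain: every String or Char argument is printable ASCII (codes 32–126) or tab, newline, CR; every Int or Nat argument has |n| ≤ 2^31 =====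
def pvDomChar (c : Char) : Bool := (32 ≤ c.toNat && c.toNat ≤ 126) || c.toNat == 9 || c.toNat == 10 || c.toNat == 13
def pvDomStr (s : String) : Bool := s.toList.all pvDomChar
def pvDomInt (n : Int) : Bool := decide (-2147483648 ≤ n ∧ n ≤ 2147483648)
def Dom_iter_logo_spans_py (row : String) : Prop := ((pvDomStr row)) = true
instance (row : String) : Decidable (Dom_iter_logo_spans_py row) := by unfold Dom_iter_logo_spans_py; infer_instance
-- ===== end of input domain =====

-- B replaces A's per-character accumulator state machine by a two-pointer run scanner
-- that slices each maximal equal-role run out of the row; objective: alternative.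

-- ===== PORT A =====
-- _logo_span_role: membership in the two frozensets, in A's branch order.
def roleOf (c : Char) : Option String :=
  if c = 'B' ∨ c = 'I' then some "accent"
  else if c = '>' ∨ c = '_' ∨ c = '/' then some "cutout"
  else none

-- A's for-loop with state (current_role, current_chars), plus the terminal flush.
def iterLoopA (xs : List Char) (currentRole : Option String) (currentChars : List Char) :
    List (String × Option String) :=
  match xs with
  | [] => if currentChars = [] then [] else [(String.mk currentChars, currentRole)]
  | c :: rest =>
    let role := roleOf c
    if currentChars ≠ [] ∧ role ≠ currentRole then
      (String.mk currentChars, currentRole) :: iterLoopA rest role [c]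
    else
      iterLoopA rest role (currentChars ++ [c])

def iter_logo_spans_py (row : String) : List (String × Option String) :=
  iterLoopA row.toList none []

-- ===== PORT B =====
-- B's inner while loop 'while j < n and role(row[j]) == role: j += 1': the number of
-- leading chars of the suffix whose role equals `role` (the advance of pointer j).
def runLen (xs : List Char) (role : Option String) : Nat :=
  match xs with
  | [] => 0
  | c :: rest => if roleOf c = role then runLen rest role + 1 else 0

-- B's outer while loop over i: the slice row[i:j] becomes take/drop on the current
-- suffix (exact, since 0 ≤ i ≤ j ≤ n there); each step emits one run and jumps i to j.
def iterRunsB (xs : List Char) : List (String × Option String) :=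
  match xs with
  | [] => []
  | c :: rest =>
    let role := roleOf c
    let j := runLen rest role
    (String.mk (c :: rest.take j), role) :: iterRunsB (rest.drop j)
termination_by xs.length
decreasing_by
  simp only [List.length_cons, List.length_drop]; omega

def iter_logo_spans_py_alt (row : String) : List (String × Option String) :=
  iterRunsB row.toList

-- ===== PRECONDITION & SPEC =====
def Spec_iter_logo_spans_py (row : String) (out : List (String × Option String)) : Prop := out = iter_logo_spans_py_alt row
instance (row : String) (out : List (String × Option String)) : Decidable (Spec_iter_logo_spans_py row out) := by unfold Spec_iter_logo_spans_py; infer_instance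

-- ===== CLAIM (what is proved, stated in full; the proofs are below) =====
def Claim_equal_iter_logo_spans_py : Prop := ∀ (row : String), Dom_iter_logo_spans_py row → Spec_iter_logo_spans_py row (iter_logo_spans_py row)

-- ===== LEMMAS AND PROOFS =====

-- Invariant of A's loop when the pending chunk is nonempty and current_role is the role
-- of its chars: the pending chunk absorbs the leading run of matching role, then B's
-- run scanner takes over on the remainder.
theorem iterLoopA_run (xs : List Char) : ∀ (d : Char) (ds : List Char),
    iterLoopA xs (roleOf d) (d :: ds) =
      (String.mk (d :: ds ++ xs.take (runLen xs (roleOf d))), roleOf d) ::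
        iterRunsB (xs.drop (runLen xs (roleOf d))) := by
  induction xs with
  | nil => intro d ds; simp [iterLoopA, runLen, iterRunsB]
  | cons c rest ih =>
    intro d ds
    by_cases h : roleOf c = roleOf d
    · have step : iterLoopA (c :: rest) (roleOf d) (d :: ds) =
          iterLoopA rest (roleOf c) (d :: (ds ++ [c])) := by
        simp [iterLoopA, h]
      rw [step, h, ih d (ds ++ [c])]
      simp [runLen, h, List.take_succ_cons, List.drop_succ_cons]
    · have step : iterLoopA (c :: rest) (roleOf d) (d :: ds) =
          (String.mk (d :: ds), roleOf d) :: iterLoopA rest (roleOf c) [c] := by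
        simp [iterLoopA, h]
      rw [step, ih c []]
      simp [runLen, h, iterRunsB]

-- ===== VERDICT (by name: the statement is the Claim_ definition above) =====
theorem iter_logo_spans_py_spec : Claim_equal_iter_logo_spans_py := by
  intro row _
  unfold Spec_iter_logo_spans_py iter_logo_spans_py iter_logo_spans_py_alt
  rcases hl : row.toList with _ | ⟨c, rest⟩
  · simp [iterLoopA, iterRunsB]
  · have step : iterLoopA (c :: rest) none [] = iterLoopA rest (roleOf c) [c] := by
      simp [iterLoopA]
    rw [step, iterLoopA_run rest c []]
    simp [iterRunsB]
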